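-- pv_equiv track=rewrite | github.com/IanDanielM/Spotify-Playlist-Agent | spotifyops/logic/hierarchical_reorder.py | _determine_category_order
-- ===== SOURCE A (Python) =====
-- from typing import List, Dict, Any, Optional
--
-- def _determine_category_order(categories: List[str], reorder_style: Optional[str]) -> List[str]:
--     """
--     Determines the logical order of categories.
--     """
--     # Simple heuristic-based ordering
--     priority_keywords = {
--         'opening': 0, 'intro': 0, 'beginning': 0, 'start': 0,
--         'building': 1, 'rise': 1, 'growing': 1, 'development': 1,
--         'peak': 2, 'climax': 2, 'high': 2, 'intense': 2,
--         'emotional': 3, 'heart': 3, 'core': 3, 'deep': 3,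
--         'resolution': 4, 'ending': 4, 'outro': 4, 'conclusion': 4
--     }
--
--     def category_score(category: str) -> int:
--         category_lower = category.lower()
--         for keyword, score in priority_keywords.items():
--             if keyword in category_lower:
--                 return score
--         return 3  # Default to middle (changed from 2.5 to 3 for int return)
--
--     return sorted(categories, key=category_score)
-- ===== SOURCE B (Python) =====
-- from typing import List, Optional
--
-- def _determine_category_order(categories: List[str], reorder_style: Optional[str]) -> List[str]:
--     # Keywords grouped by score; the original dict's insertion order is exactly
--     # score-ascending, so "first keyword match in dict order" == "lowest-scoring
--     # group containing a match".
--     keyword_groups = [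
--         ['opening', 'intro', 'beginning', 'start'],
--         ['building', 'rise', 'growing', 'development'],
--         ['peak', 'climax', 'high', 'intense'],
--         ['emotional', 'heart', 'core', 'deep'],
--         ['resolution', 'ending', 'outro', 'conclusion'],
--     ]
--
--     def score(category: str) -> int:
--         cl = category.lower()
--         for s, kws in enumerate(keyword_groups):
--             if any(k in cl for k in kws):
--                 return s
--         return 3
--
--     # stable bucket sort over the fixed score range 0..4
--     buckets = [[], [], [], [], []]
--     for c in categories:
--         buckets[score(c)].append(c)
--     return [c for b in buckets for c in b]
-- ===== Notes on version B (the rewrite author's own statement) =====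
-- stated objective: alternative
-- what changed: Replaces sorted(categories, key=score) over a flat keyword->score dict with a stable bucket sort: keywords are stored grouped per score, each category's score is the first group containing a matching keyword (default 3), categories are appended in one pass to five score buckets which are then concatenated.
import Mathlib
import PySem

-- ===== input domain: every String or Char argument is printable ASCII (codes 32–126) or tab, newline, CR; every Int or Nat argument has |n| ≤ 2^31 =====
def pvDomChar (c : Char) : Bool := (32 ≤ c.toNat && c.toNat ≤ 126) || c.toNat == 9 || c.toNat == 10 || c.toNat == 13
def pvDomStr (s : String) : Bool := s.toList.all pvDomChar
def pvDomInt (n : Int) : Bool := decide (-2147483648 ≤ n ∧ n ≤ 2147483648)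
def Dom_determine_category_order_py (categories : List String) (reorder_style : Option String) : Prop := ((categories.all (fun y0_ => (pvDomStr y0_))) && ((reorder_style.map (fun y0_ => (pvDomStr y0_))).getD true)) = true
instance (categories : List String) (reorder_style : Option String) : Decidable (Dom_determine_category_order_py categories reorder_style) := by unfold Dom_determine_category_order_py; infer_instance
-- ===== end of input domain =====

-- B replaces sorted(categories, key=score) with a stable bucket sort: keywords grouped per score, one pass appending each category to its score bucket, buckets concatenated (alternative algorithm, same result).


-- ===== PORT A =====
-- the priority_keywords dict, in insertion order
def pvKeywords : List (String × Int) :=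
  [("opening", 0), ("intro", 0), ("beginning", 0), ("start", 0),
   ("building", 1), ("rise", 1), ("growing", 1), ("development", 1),
   ("peak", 2), ("climax", 2), ("high", 2), ("intense", 2),
   ("emotional", 3), ("heart", 3), ("core", 3), ("deep", 3),
   ("resolution", 4), ("ending", 4), ("outro", 4), ("conclusion", 4)]

-- category_score: first keyword contained in category.lower() wins, default 3
def pvScore (category : String) : Int :=
  let category_lower := PySem.Str.lower category
  match pvKeywords.find? (fun p => PySem.Str.isIn p.1 category_lower) with
  | some p => p.2
  | none => 3

def determine_category_order_py (categories : List String) (reorder_style : Option String) : List String :=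
  PySem.List.sorted categories pvScore false

-- ===== PORT B =====
-- Source B's keyword_groups: keywords grouped by score, score-ascending
def pvGroups : List (List String) :=
  [["opening", "intro", "beginning", "start"],
   ["building", "rise", "growing", "development"],
   ["peak", "climax", "high", "intense"],
   ["emotional", "heart", "core", "deep"],
   ["resolution", "ending", "outro", "conclusion"]]

-- Source B's score: first group (by enumerate index) containing a matching keyword, default 3
def pvScoreB (category : String) : Int :=
  let cl := PySem.Str.lower category
  match (PySem.List.enumerate pvGroups).find? (fun p => p.2.any (fun k => PySem.Str.isIn k cl)) with
  | some p => p.1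
  | none => 3

-- Source B's bucket loop; the index is provably in 0..4, so .toNat is exact here
def determine_category_order_py_alt (categories : List String) (reorder_style : Option String) : List String :=
  let buckets := categories.foldl
    (fun b c => b.modify (pvScoreB c).toNat (fun l => l ++ [c]))
    [[], [], [], [], []]
  buckets.flatten

-- ===== PRECONDITION & SPEC =====
def Spec_determine_category_order_py (categories : List String) (reorder_style : Option String) (out : List String) : Prop := out = determine_category_order_py_alt categories reorder_style
instance (categories : List String) (reorder_style : Option String) (out : List String) : Decidable (Spec_determine_category_order_py categories reorder_style out) := by unfold Spec_determine_category_order_py; infer_instance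

-- ===== CLAIM =====
def Claim_equal_determine_category_order_py : Prop := ∀ (categories : List String) (reorder_style : Option String), Dom_determine_category_order_py categories reorder_style → Spec_determine_category_order_py categories reorder_style (determine_category_order_py categories reorder_style)

-- ===== LEMMAS AND PROOFS =====

-- B's grouped first-match score equals A's flat-dict first-match score
theorem score_eq (c : String) : pvScoreB c = pvScore c := by
  unfold pvScoreB pvScore pvGroups pvKeywords
  simp only [PySem.List.enumerate_cons, PySem.List.enumerate_nil, List.find?, List.any_cons,
    List.any_nil, Bool.or_false]
  by_cases h0 : PySem.Str.isIn "opening" (PySem.Str.lower c) = true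
  · simp_all
  by_cases h1 : PySem.Str.isIn "intro" (PySem.Str.lower c) = true
  · simp_all
  by_cases h2 : PySem.Str.isIn "beginning" (PySem.Str.lower c) = true
  · simp_all
  by_cases h3 : PySem.Str.isIn "start" (PySem.Str.lower c) = true
  · simp_all
  by_cases h4 : PySem.Str.isIn "building" (PySem.Str.lower c) = true
  · simp_all
  by_cases h5 : PySem.Str.isIn "rise" (PySem.Str.lower c) = true
  · simp_all
  by_cases h6 : PySem.Str.isIn "growing" (PySem.Str.lower c) = true
  · simp_all
  by_cases h7 : PySem.Str.isIn "development" (PySem.Str.lower c) = true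
  · simp_all
  by_cases h8 : PySem.Str.isIn "peak" (PySem.Str.lower c) = true
  · simp_all
  by_cases h9 : PySem.Str.isIn "climax" (PySem.Str.lower c) = true
  · simp_all
  by_cases h10 : PySem.Str.isIn "high" (PySem.Str.lower c) = true
  · simp_all
  by_cases h11 : PySem.Str.isIn "intense" (PySem.Str.lower c) = true
  · simp_all
  by_cases h12 : PySem.Str.isIn "emotional" (PySem.Str.lower c) = true
  · simp_all
  by_cases h13 : PySem.Str.isIn "heart" (PySem.Str.lower c) = true
  · simp_all
  by_cases h14 : PySem.Str.isIn "core" (PySem.Str.lower c) = true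
  · simp_all
  by_cases h15 : PySem.Str.isIn "deep" (PySem.Str.lower c) = true
  · simp_all
  by_cases h16 : PySem.Str.isIn "resolution" (PySem.Str.lower c) = true
  · simp_all
  by_cases h17 : PySem.Str.isIn "ending" (PySem.Str.lower c) = true
  · simp_all
  by_cases h18 : PySem.Str.isIn "outro" (PySem.Str.lower c) = true
  · simp_all
  by_cases h19 : PySem.Str.isIn "conclusion" (PySem.Str.lower c) = true
  · simp_all
  simp_all

-- the i-th bucket is exactly the (stable) filter of the inputs scoring i
def pvF (i : Int) (xs : List String) : List String := xs.filter (fun c => pvScore c == i)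

theorem pvScore_range (c : String) : 0 ≤ pvScore c ∧ pvScore c ≤ 4 := by
  have hall : ∀ p ∈ pvKeywords, 0 ≤ p.2 ∧ p.2 ≤ 4 := by decide
  unfold pvScore
  dsimp only
  split
  · next p hp => exact hall _ (List.mem_of_find?_eq_some hp)
  · norm_num

theorem insertBy_split (before : String → String → Bool) (x : String) (ys zs : List String)
    (hy : ∀ y ∈ ys, before x y = false) (hz : ∀ z ∈ zs, before x z = true) :
    PySem.List.insertBy before x (ys ++ zs) = ys ++ x :: zs := by
  induction ys with
  | nil =>
    cases zs with
    | nil => simp [PySem.List.insertBy]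
    | cons z zs => simp [PySem.List.insertBy, hz z (by simp)]
  | cons y ys ih =>
    simp only [List.cons_append, PySem.List.insertBy, hy y (by simp)]
    simp only [Bool.false_eq_true, if_false]
    rw [ih (fun y' h' => hy y' (by simp [h']))]

theorem mem_pvF {i : Int} {xs : List String} {y : String} (h : y ∈ pvF i xs) : pvScore y = i := by
  unfold pvF at h
  have := (List.mem_filter.mp h).2
  simpa using this

theorem pvF_append_singleton (i : Int) (xs : List String) (x : String) :
    pvF i (xs ++ [x]) = pvF i xs ++ (if pvScore x == i then [x] else []) := by
  unfold pvF
  simp only [List.filter_append, List.filter_cons, List.filter_nil]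

theorem pvF_cons (i : Int) (x : String) (xs : List String) :
    pvF i (x :: xs) = (if pvScore x == i then [x] else []) ++ pvF i xs := by
  unfold pvF
  simp only [List.filter_cons]
  split <;> simp_all

-- A's insertion sort produces the buckets in score order
theorem A_eq_buckets (xs : List String) :
    PySem.List.sorted xs pvScore false =
      pvF 0 xs ++ pvF 1 xs ++ pvF 2 xs ++ pvF 3 xs ++ pvF 4 xs := by
  rw [PySem.List.sorted_eq_foldl_insertBy]
  induction xs using List.reverseRecOn with
  | nil => simp [pvF]
  | append_singleton xs x ih =>
    rw [List.foldl_append, List.foldl_cons, List.foldl_nil, ih]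
    obtain ⟨h0, h4⟩ := pvScore_range x
    have key : ∀ (ys zs : List String), (∀ y ∈ ys, ¬ pvScore x < pvScore y) →
        (∀ z ∈ zs, pvScore x < pvScore z) →
        PySem.List.insertBy (fun a b => decide (pvScore a < pvScore b)) x (ys ++ zs) = ys ++ x :: zs := by
      intro ys zs hy hz
      exact insertBy_split _ x ys zs (fun y h => by simpa using hy y h) (fun z h => by simpa using hz z h)
    simp only [pvF_append_singleton]
    interval_cases h : pvScore x
    · have := key (pvF 0 xs) (pvF 1 xs ++ pvF 2 xs ++ pvF 3 xs ++ pvF 4 xs)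
        (by intro y hy; rw [mem_pvF hy]; omega)
        (by intro z hz; simp only [List.append_assoc, List.mem_append] at hz
            rcases hz with hz | hz | hz | hz <;> rw [mem_pvF hz] <;> omega)
      simp only [List.append_assoc] at this ⊢
      rw [this]; simp
    · have := key (pvF 0 xs ++ pvF 1 xs) (pvF 2 xs ++ pvF 3 xs ++ pvF 4 xs)
        (by intro y hy; simp only [List.mem_append] at hy
            rcases hy with hy | hy <;> rw [mem_pvF hy] <;> omega)
        (by intro z hz; simp only [List.append_assoc, List.mem_append] at hz
            rcases hz with hz | hz | hz <;> rw [mem_pvF hz] <;> omega)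
      simp only [List.append_assoc] at this ⊢
      rw [this]; simp
    · have := key (pvF 0 xs ++ pvF 1 xs ++ pvF 2 xs) (pvF 3 xs ++ pvF 4 xs)
        (by intro y hy; simp only [List.append_assoc, List.mem_append] at hy
            rcases hy with hy | hy | hy <;> rw [mem_pvF hy] <;> omega)
        (by intro z hz; simp only [List.mem_append] at hz
            rcases hz with hz | hz <;> rw [mem_pvF hz] <;> omega)
      simp only [List.append_assoc] at this ⊢
      rw [this]; simp
    · have := key (pvF 0 xs ++ pvF 1 xs ++ pvF 2 xs ++ pvF 3 xs) (pvF 4 xs)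
        (by intro y hy; simp only [List.append_assoc, List.mem_append] at hy
            rcases hy with hy | hy | hy | hy <;> rw [mem_pvF hy] <;> omega)
        (by intro z hz; rw [mem_pvF hz]; omega)
      simp only [List.append_assoc] at this ⊢
      rw [this]; simp
    · rw [PySem.List.insertBy_of_forall_not_before _ x _
        (by intro y hy
            simp only [List.append_assoc, List.mem_append] at hy
            rcases hy with hy | hy | hy | hy | hy <;> simp [mem_pvF hy, h])]
      simp

-- B's bucket loop with generalized bucket contents
theorem B_loop (xs : List String) (b0 b1 b2 b3 b4 : List String) :
    xs.foldl (fun b c => b.modify (pvScoreB c).toNat (fun l => l ++ [c])) [b0, b1, b2, b3, b4] =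
    [b0 ++ pvF 0 xs, b1 ++ pvF 1 xs, b2 ++ pvF 2 xs, b3 ++ pvF 3 xs, b4 ++ pvF 4 xs] := by
  induction xs generalizing b0 b1 b2 b3 b4 with
  | nil => simp [pvF]
  | cons x xs ih =>
    obtain ⟨h0, h4⟩ := pvScore_range x
    rw [List.foldl_cons, score_eq]
    interval_cases h : pvScore x
    · rw [show List.modify [b0, b1, b2, b3, b4] (Int.toNat 0) (fun l => l ++ [x]) = [b0 ++ [x], b1, b2, b3, b4] from rfl, ih]
      simp [pvF_cons, h]
    · rw [show List.modify [b0, b1, b2, b3, b4] (Int.toNat 1) (fun l => l ++ [x]) = [b0, b1 ++ [x], b2, b3, b4] from rfl, ih]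
      simp [pvF_cons, h]
    · rw [show List.modify [b0, b1, b2, b3, b4] (Int.toNat 2) (fun l => l ++ [x]) = [b0, b1, b2 ++ [x], b3, b4] from rfl, ih]
      simp [pvF_cons, h]
    · rw [show List.modify [b0, b1, b2, b3, b4] (Int.toNat 3) (fun l => l ++ [x]) = [b0, b1, b2, b3 ++ [x], b4] from rfl, ih]
      simp [pvF_cons, h]
    · rw [show List.modify [b0, b1, b2, b3, b4] (Int.toNat 4) (fun l => l ++ [x]) = [b0, b1, b2, b3, b4 ++ [x]] from rfl, ih]
      simp [pvF_cons, h]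

theorem ports_eq (categories : List String) (reorder_style : Option String) :
    determine_category_order_py categories reorder_style =
      determine_category_order_py_alt categories reorder_style := by
  unfold determine_category_order_py determine_category_order_py_alt
  rw [B_loop]
  simp [A_eq_buckets]

-- ===== VERDICT =====
theorem determine_category_order_py_spec : Claim_equal_determine_category_order_py := by
  intro categories reorder_style _
  unfold Spec_determine_category_order_py
  exact ports_eq categories reorder_style
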